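-- pv_equiv track=rewrite | github.com/algostudy0811/CodingTest | week01/1_BOJ_12845_모두의_마블/BOJ_12845_정영일.py | max_point
-- ===== SOURCE A (Python) =====
-- def max_point(cards):
--     total_points = 0
--     while len(cards) > 1:
--         max_card = max(cards)
--         max_index = cards.index(max_card)
--         if max_index == 0 :
--             total_points += cards[max_index] + cards[max_index+1]
--             cards.remove(cards[max_index+1])
--         elif max_index == len(cards)-1 :
--             total_points += cards[max_index] + cards[max_index-1]
--             cards.remove(cards[max_index-1])
--         else:
--             if cards[max_index-1] > cards[max_index+1] :
--                 total_points += cards[max_index] + cards[max_index+1]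
--                 cards.remove(cards[max_index+1])
--             else:
--                 total_points += cards[max_index] + cards[max_index-1]
--                 cards.remove(cards[max_index-1])
--     return total_points
-- ===== SOURCE B (Python) =====
-- def max_point(cards):
--     # Closed form: every round adds max + (a neighbor <= max) and removes
--     # that neighbor; the maximum always survives, so the total is
--     # (n-1)*max + (sum - max) = (n-2)*max + sum for n >= 1 (0 for n <= 1).
--     # Note: A empties `cards` in place; B does not mutate its argument.
--     if len(cards) <= 1:
--         return 0
--     return (len(cards) - 2) * max(cards) + sum(cards)
-- ===== Notes on version B (the rewrite author's own statement) =====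
-- stated objective: faster
-- what changed: Replaced the quadratic simulation (repeated max/index/remove on a shrinking list) by the closed form (n-2)*max(cards)+sum(cards), justified by the invariant that each round adds max plus the removed neighbor and the maximum never leaves the list.
import Mathlib
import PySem

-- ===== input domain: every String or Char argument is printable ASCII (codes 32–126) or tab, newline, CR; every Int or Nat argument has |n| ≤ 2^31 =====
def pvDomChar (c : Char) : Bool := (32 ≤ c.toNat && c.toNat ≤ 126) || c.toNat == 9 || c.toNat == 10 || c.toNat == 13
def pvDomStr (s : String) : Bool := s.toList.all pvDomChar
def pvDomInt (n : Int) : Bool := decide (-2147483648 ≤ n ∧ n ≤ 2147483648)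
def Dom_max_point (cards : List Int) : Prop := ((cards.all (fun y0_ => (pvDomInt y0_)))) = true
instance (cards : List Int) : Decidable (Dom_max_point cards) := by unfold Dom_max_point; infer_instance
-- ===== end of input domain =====

-- B replaces A's quadratic max/index/remove simulation by the closed form
-- (n-2)*max + sum (objective: faster, asymptotic).  A empties its argument
-- list in place; B does not mutate — the equivalence is about the return value.

-- ===== PORT A =====
-- termination helper for the while loop: a successful remove shortens the list
theorem pv_remove_some_length {xs ys : List Int} {v : Int}
    (h : PySem.List.remove? xs v = some ys) : ys.length < xs.length := by
  have hv : v ∈ xs := by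
    by_contra hv
    have h2 := (PySem.List.remove?_eq_none_iff xs v).2 hv
    rw [h2] at h
    simp at h
  have h2 : PySem.List.remove? xs v = some (xs.erase v) := PySem.List.remove?_eq_some_erase xs v hv
  rw [h2] at h
  have h3 : ys = xs.erase v := (Option.some.inj h).symm
  subst h3
  have h4 := List.length_erase_of_mem hv
  have h5 : 0 < xs.length := List.length_pos_of_mem hv
  omega

-- literal transliteration of A's while loop (state: cards, total_points)
def maxPointGo (cards : List Int) (total : Int) : Int :=
  if h : 1 < cards.length then
    let maxCard := (PySem.List.max? cards (fun y => y)).getD 0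
    let maxIndex := (PySem.List.index? cards maxCard).getD 0
    if maxIndex = 0 then
      let t := total + (PySem.List.pyGet? cards (maxIndex : Int)).getD 0
                     + (PySem.List.pyGet? cards ((maxIndex : Int) + 1)).getD 0
      match hr : PySem.List.remove? cards ((PySem.List.pyGet? cards ((maxIndex : Int) + 1)).getD 0) with
      | some cards' => maxPointGo cards' t
      | none => t
    else if maxIndex = cards.length - 1 then
      let t := total + (PySem.List.pyGet? cards (maxIndex : Int)).getD 0
                     + (PySem.List.pyGet? cards ((maxIndex : Int) - 1)).getD 0
      match hr : PySem.List.remove? cards ((PySem.List.pyGet? cards ((maxIndex : Int) - 1)).getD 0) with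
      | some cards' => maxPointGo cards' t
      | none => t
    else
      if (PySem.List.pyGet? cards ((maxIndex : Int) - 1)).getD 0
           > (PySem.List.pyGet? cards ((maxIndex : Int) + 1)).getD 0 then
        let t := total + (PySem.List.pyGet? cards (maxIndex : Int)).getD 0
                       + (PySem.List.pyGet? cards ((maxIndex : Int) + 1)).getD 0
        match hr : PySem.List.remove? cards ((PySem.List.pyGet? cards ((maxIndex : Int) + 1)).getD 0) with
        | some cards' => maxPointGo cards' t
        | none => t
      else
        let t := total + (PySem.List.pyGet? cards (maxIndex : Int)).getD 0
                       + (PySem.List.pyGet? cards ((maxIndex : Int) - 1)).getD 0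
        match hr : PySem.List.remove? cards ((PySem.List.pyGet? cards ((maxIndex : Int) - 1)).getD 0) with
        | some cards' => maxPointGo cards' t
        | none => t
  else total
termination_by cards.length
decreasing_by
  all_goals exact pv_remove_some_length hr

def max_point (cards : List Int) : Int := maxPointGo cards 0

-- ===== PORT B =====
def max_point_alt (cards : List Int) : Int :=
  if cards.length ≤ 1 then 0
  else ((cards.length : Int) - 2) * ((PySem.List.max? cards (fun y => y)).getD 0) + cards.sum

-- ===== PRECONDITION & SPEC =====
def Spec_max_point (cards : List Int) (out : Int) : Prop := out = max_point_alt cards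
instance (cards : List Int) (out : Int) : Decidable (Spec_max_point cards out) := by unfold Spec_max_point; infer_instance

-- ===== CLAIM (what is proved, stated in full; the proofs are below) =====
def Claim_equal_max_point : Prop := ∀ (cards : List Int), Dom_max_point cards → Spec_max_point cards (max_point cards)

-- ===== LEMMAS AND PROOFS =====

theorem pv_two_le_count {xs : List Int} {i j : Nat} (hij : i < j) (hj : j < xs.length)
    (h : xs[i]'(by omega) = xs[j]) : 2 ≤ xs.count (xs[j]) := by
  have hsplit : xs = xs.take j ++ xs.drop j := (List.take_append_drop j xs).symm
  have h1 : xs[j] ∈ xs.take j := by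
    have : (xs.take j)[i]'(by simp [List.length_take]; omega) = xs[i]'(by omega) :=
      List.getElem_take
    rw [← h, ← this]
    exact List.getElem_mem _
  have h2 : xs[j] ∈ xs.drop j := by
    have : (xs.drop j)[0]'(by simp [List.length_drop]; omega) = xs[j] := by
      simp [List.getElem_drop]
    rw [← this]
    exact List.getElem_mem _
  calc 2 = 1 + 1 := rfl
    _ ≤ (xs.take j).count (xs[j]) + (xs.drop j).count (xs[j]) :=
        Nat.add_le_add (List.one_le_count_iff.2 h1) (List.one_le_count_iff.2 h2)
    _ = xs.count (xs[j]) := by rw [← List.count_append, ← hsplit]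

theorem pv_mem_erase_of_two_idx {xs : List Int} {i j : Nat}
    (hi : i < xs.length) (hj : j < xs.length) (hne : i ≠ j) :
    xs[i] ∈ xs.erase (xs[j]) := by
  by_cases heq : xs[i] = xs[j]
  · have hcnt : 2 ≤ xs.count (xs[j]) := by
      rcases Nat.lt_or_ge i j with hlt | hge
      · exact pv_two_le_count hlt hj heq
      · have hlt : j < i := by omega
        have := pv_two_le_count hlt hi heq.symm
        rwa [heq] at this
    rw [heq]
    have : 0 < (xs.erase (xs[j])).count (xs[j]) := by
      rw [List.count_erase_self]
      omega
    exact List.count_pos_iff.1 this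
  · exact (List.mem_erase_of_ne heq).2 (List.getElem_mem _)

theorem pv_max_erase {xs : List Int} {M r : Int}
    (hM : PySem.List.max? xs (fun y => y) = some M) (hmem : M ∈ xs.erase r) :
    PySem.List.max? (xs.erase r) (fun y => y) = some M := by
  cases hx : PySem.List.max? (xs.erase r) (fun y => y) with
  | none =>
    have : xs.erase r = [] := (PySem.List.max?_eq_none_iff _ _).1 hx
    rw [this] at hmem
    exact absurd hmem (List.not_mem_nil)
  | some m' =>
    have hm'mem : m' ∈ xs.erase r := PySem.List.max?_mem hx
    have h1 : m' ≤ M := PySem.List.max?_isMax hM m' (List.Sublist.mem hm'mem (List.erase_sublist))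
    have h2 : M ≤ m' := PySem.List.max?_isMax hx M hmem
    rw [le_antisymm h1 h2]

-- one round of the loop: removing a present value r while the max M survives
theorem pv_go_step (cards : List Int) (total M r : Int) (n : Nat)
    (hlen : cards.length = n) (hn : 2 ≤ n)
    (hM : PySem.List.max? cards (fun y => y) = some M)
    (hr : r ∈ cards) (hMe : M ∈ cards.erase r)
    (ih : ∀ m, m < n → ∀ (cs : List Int) (t : Int), cs.length = m → 1 ≤ m →
      maxPointGo cs t = t + ((m : Int) - 2) * ((PySem.List.max? cs (fun y => y)).getD 0) + cs.sum) :
    maxPointGo (cards.erase r) (total + M + r)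
      = total + ((n : Int) - 2) * M + cards.sum := by
  have hlen' : (cards.erase r).length = n - 1 := by
    rw [List.length_erase_of_mem hr]; omega
  rw [ih (n - 1) (by omega) _ _ hlen' (by omega), pv_max_erase hM hMe]
  have hsum : cards.sum = r + (cards.erase r).sum := by
    calc cards.sum = (r :: cards.erase r).sum := (List.perm_cons_erase hr).sum_eq
      _ = r + (cards.erase r).sum := by simp
  have hcast : ((n - 1 : Nat) : Int) = (n : Int) - 1 := by omega
  rw [hsum, Option.getD_some, hcast]
  ring

theorem pv_go_eq : ∀ (n : Nat) (cards : List Int) (total : Int), cards.length = n → 1 ≤ n →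
    maxPointGo cards total
      = total + ((n : Int) - 2) * ((PySem.List.max? cards (fun y => y)).getD 0) + cards.sum := by
  intro n
  induction n using Nat.strong_induction_on with
  | _ n ih =>
  intro cards total hlen hn
  by_cases h2 : 1 < cards.length
  case neg =>
    -- singleton list: the loop body never runs and (1-2)*a + a = 0
    have hn1 : n = 1 := by omega
    obtain ⟨a, rfl⟩ : ∃ a, cards = [a] := by
      cases cards with
      | nil => simp at hlen; omega
      | cons a t =>
        cases t with
        | nil => exact ⟨a, rfl⟩
        | cons b t' => exfalso; simp at h2
    rw [maxPointGo]
    simp [hn1, PySem.List.max?_id_cons]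
  case pos =>
    have hne : cards ≠ [] := by intro e; rw [e] at h2; simp at h2
    obtain ⟨M, hM⟩ : ∃ M, PySem.List.max? cards (fun y => y) = some M := by
      cases hx : PySem.List.max? cards (fun y => y) with
      | none => exact absurd ((PySem.List.max?_eq_none_iff _ _).1 hx) hne
      | some m => exact ⟨m, rfl⟩
    have hMmem : M ∈ cards := PySem.List.max?_mem hM
    obtain ⟨i, hI⟩ : ∃ i, PySem.List.index? cards M = some i := by
      cases hx : PySem.List.index? cards M with
      | none => exact absurd hMmem ((PySem.List.index?_eq_none_iff cards M).1 hx)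
      | some k => exact ⟨k, rfl⟩
    obtain ⟨hilen, hival, hifirst⟩ := PySem.List.getElem_of_index?_eq_some hI
    have hn2 : 2 ≤ n := by omega
    rw [maxPointGo]
    simp only [dif_pos h2, hM, hI, Option.getD_some]
    have hgi : (PySem.List.pyGet? cards (i : Int)).getD 0 = M := by
      rw [PySem.List.pyGet?_natCast, List.getElem?_eq_getElem hilen, hival, Option.getD_some]
    by_cases hi0 : i = 0
    · -- max at the left end: remove the right neighbour cards[i+1]
      rw [if_pos hi0]
      have hj : i + 1 < cards.length := by omega
      have hc : ((i : Nat) : Int) + 1 = (((i + 1 : Nat)) : Int) := by push_cast; ring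
      have hg1 : (PySem.List.pyGet? cards ((i : Int) + 1)).getD 0 = cards[i + 1] := by
        rw [hc, PySem.List.pyGet?_natCast, List.getElem?_eq_getElem hj, Option.getD_some]
      have hmem1 : cards[i + 1] ∈ cards := List.getElem_mem _
      have hMe : M ∈ cards.erase (cards[i + 1]) :=
        hival ▸ pv_mem_erase_of_two_idx hilen hj (by omega)
      split
      · next cards' hr =>
        simp only [hM, hI, Option.getD_some, hg1] at hr
        rw [PySem.List.remove?_eq_some_erase cards _ hmem1] at hr
        obtain rfl := (Option.some.inj hr).symm
        simp only [hgi, hg1]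
        exact pv_go_step cards total M _ n hlen hn2 hM hmem1 hMe ih
      · next hr =>
        simp only [hM, hI, Option.getD_some, hg1] at hr
        exact absurd hmem1 ((PySem.List.remove?_eq_none_iff _ _).1 hr)
    · rw [if_neg hi0]
      by_cases hiL : i = cards.length - 1
      · -- max at the right end: remove the left neighbour cards[i-1]
        rw [if_pos hiL]
        have hj : i - 1 < cards.length := by omega
        have hc : ((i : Nat) : Int) - 1 = (((i - 1 : Nat)) : Int) := by omega
        have hg1 : (PySem.List.pyGet? cards ((i : Int) - 1)).getD 0 = cards[i - 1] := by
          rw [hc, PySem.List.pyGet?_natCast, List.getElem?_eq_getElem hj, Option.getD_some]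
        have hmem1 : cards[i - 1] ∈ cards := List.getElem_mem _
        have hMe : M ∈ cards.erase (cards[i - 1]) :=
          hival ▸ pv_mem_erase_of_two_idx hilen hj (by omega)
        split
        · next cards' hr =>
          simp only [hM, hI, Option.getD_some, hg1] at hr
          rw [PySem.List.remove?_eq_some_erase cards _ hmem1] at hr
          obtain rfl := (Option.some.inj hr).symm
          simp only [hgi, hg1]
          exact pv_go_step cards total M _ n hlen hn2 hM hmem1 hMe ih
        · next hr =>
          simp only [hM, hI, Option.getD_some, hg1] at hr
          exact absurd hmem1 ((PySem.List.remove?_eq_none_iff _ _).1 hr)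
      · -- max in the middle: remove the smaller neighbour
        rw [if_neg hiL]
        split_ifs with hcmp
        · -- right neighbour is smaller: remove cards[i+1]
          have hj : i + 1 < cards.length := by omega
          have hc : ((i : Nat) : Int) + 1 = (((i + 1 : Nat)) : Int) := by push_cast; ring
          have hg1 : (PySem.List.pyGet? cards ((i : Int) + 1)).getD 0 = cards[i + 1] := by
            rw [hc, PySem.List.pyGet?_natCast, List.getElem?_eq_getElem hj, Option.getD_some]
          have hmem1 : cards[i + 1] ∈ cards := List.getElem_mem _
          have hMe : M ∈ cards.erase (cards[i + 1]) :=
            hival ▸ pv_mem_erase_of_two_idx hilen hj (by omega)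
          split
          · next cards' hr =>
            simp only [hM, hI, Option.getD_some, hg1] at hr
            rw [PySem.List.remove?_eq_some_erase cards _ hmem1] at hr
            obtain rfl := (Option.some.inj hr).symm
            simp only [hgi, hg1]
            exact pv_go_step cards total M _ n hlen hn2 hM hmem1 hMe ih
          · next hr =>
            simp only [hM, hI, Option.getD_some, hg1] at hr
            exact absurd hmem1 ((PySem.List.remove?_eq_none_iff _ _).1 hr)
        · -- left neighbour is not larger: remove cards[i-1]
          have hj : i - 1 < cards.length := by omega
          have hc : ((i : Nat) : Int) - 1 = (((i - 1 : Nat)) : Int) := by omega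
          have hg1 : (PySem.List.pyGet? cards ((i : Int) - 1)).getD 0 = cards[i - 1] := by
            rw [hc, PySem.List.pyGet?_natCast, List.getElem?_eq_getElem hj, Option.getD_some]
          have hmem1 : cards[i - 1] ∈ cards := List.getElem_mem _
          have hMe : M ∈ cards.erase (cards[i - 1]) :=
            hival ▸ pv_mem_erase_of_two_idx hilen hj (by omega)
          split
          · next cards' hr =>
            simp only [hM, hI, Option.getD_some, hg1] at hr
            rw [PySem.List.remove?_eq_some_erase cards _ hmem1] at hr
            obtain rfl := (Option.some.inj hr).symm
            simp only [hgi, hg1]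
            exact pv_go_step cards total M _ n hlen hn2 hM hmem1 hMe ih
          · next hr =>
            simp only [hM, hI, Option.getD_some, hg1] at hr
            exact absurd hmem1 ((PySem.List.remove?_eq_none_iff _ _).1 hr)

-- ===== VERDICT (by name: the statement is the Claim_ definition above) =====
theorem max_point_spec : Claim_equal_max_point := by
  intro cards _
  unfold Spec_max_point max_point max_point_alt
  by_cases h : cards.length ≤ 1
  · rw [maxPointGo]
    simp [Nat.not_lt.2 h, h]
  · rw [pv_go_eq cards.length cards 0 rfl (by omega)]
    simp [h]
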